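-- pv_equiv track=rewrite | github.com/pypi-data/pypi-mirror-85 | packages/Sympathy/Sympathy-2.2.0-py3-none-any.whl/sylib/figure/wizards.py | _uniquify
-- ===== SOURCE A (Python) =====
-- import itertools
--
-- def _uniquify(opts):
--     res = []
--     out = set(opts)
--     cnt = {}
--     for k in opts:
--         cnt[k] = opts.count(k)
--
--     for k in opts:
--         if cnt[k] == 1:
--             res.append(k)
--         else:
--             for i in itertools.count():
--                 candidate = f'{k}:{i}'
--                 if candidate not in out:
--                     res.append(candidate)
--                     break
--     return res
-- ===== SOURCE B (Python) =====
-- def _uniquify(opts):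
--     s = set(opts)
--     cnt = {}
--     for k in opts:
--         cnt[k] = cnt.get(k, 0) + 1
--     repl = {}
--     for k, c in cnt.items():
--         if c > 1:
--             i = 0
--             while f'{k}:{i}' in s:
--                 i += 1
--             repl[k] = f'{k}:{i}'
--     return [repl.get(k, k) for k in opts]
-- ===== Notes on version B (the rewrite author's own statement) =====
-- stated objective: faster
-- what changed: B replaces A's per-element opts.count scan and per-duplicate-occurrence suffix search with a single counting pass plus one replacement table built once per distinct duplicated value, then a single map using repl.get(k, k).
import Mathlib
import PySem

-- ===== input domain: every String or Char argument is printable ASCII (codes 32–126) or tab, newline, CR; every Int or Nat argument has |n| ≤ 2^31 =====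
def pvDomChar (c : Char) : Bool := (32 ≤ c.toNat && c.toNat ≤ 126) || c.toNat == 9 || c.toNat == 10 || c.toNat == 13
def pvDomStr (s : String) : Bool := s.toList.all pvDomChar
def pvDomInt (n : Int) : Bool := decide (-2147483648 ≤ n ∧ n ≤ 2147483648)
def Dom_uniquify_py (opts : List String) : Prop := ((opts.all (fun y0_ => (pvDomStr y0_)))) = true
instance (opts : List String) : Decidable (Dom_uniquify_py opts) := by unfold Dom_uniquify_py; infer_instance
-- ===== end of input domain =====

-- B builds the counts and one replacement name per duplicated value once, then maps; A rescans and re-searches per element.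


-- ===== PORT A =====
-- A's unbounded 'for i in itertools.count()' is ported with fuel opts.length + 1 (enough fuel that the
-- fallback branch is never the returned value when a free name exists among the first fuel candidates).
def uniquifySearchA (out : PySem.Set String) (k : String) : Nat → Int → String
  | 0, i => k ++ ":" ++ PySem.Int.toStr i
  | f + 1, i =>
    let candidate := k ++ ":" ++ PySem.Int.toStr i
    if PySem.Set.contains out candidate then uniquifySearchA out k f (i + 1) else candidate

def uniquify_py (opts : List String) : List String :=
  let out : PySem.Set String := PySem.Set.ofList opts
  let cnt : PySem.Dict String Int :=
    opts.foldl (fun d k => d.insert k (PySem.List.count opts k)) PySem.Dict.empty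
  -- cnt[k]: k is always a present key here, so the getD default is never read
  opts.foldl (fun res k =>
    if cnt.getD k 0 == 1 then res ++ [k]
    else res ++ [uniquifySearchA out k (opts.length + 1) 0]) []

-- ===== PORT B =====
-- B's 'while f"{k}:{i}" in s: i += 1' is ported with the same fuel device as A's unbounded loop.
def uniquifySearchB (s : PySem.Set String) (k : String) : Nat → Int → String
  | 0, i => k ++ ":" ++ PySem.Int.toStr i
  | f + 1, i =>
    if PySem.Set.contains s (k ++ ":" ++ PySem.Int.toStr i) then uniquifySearchB s k f (i + 1)
    else k ++ ":" ++ PySem.Int.toStr i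

def uniquify_py_alt (opts : List String) : List String :=
  let s : PySem.Set String := PySem.Set.ofList opts
  let cnt : PySem.Dict String Int :=
    opts.foldl (fun d k => d.insert k (d.getD k 0 + 1)) PySem.Dict.empty
  let repl : PySem.Dict String String :=
    cnt.items.foldl (fun r p =>
      if p.2 > 1 then r.insert p.1 (uniquifySearchB s p.1 (opts.length + 1) 0) else r)
      PySem.Dict.empty
  opts.map (fun k => (repl.get? k).getD k)

-- ===== PRECONDITION & SPEC =====
def Spec_uniquify_py (opts : List String) (out : List String) : Prop := out = uniquify_py_alt opts
instance (opts : List String) (out : List String) : Decidable (Spec_uniquify_py opts out) := by unfold Spec_uniquify_py; infer_instance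

-- ===== CLAIM (what is proved, stated in full; the proofs are below) =====
def Claim_equal_uniquify_py : Prop := ∀ (opts : List String), Dom_uniquify_py opts → Spec_uniquify_py opts (uniquify_py opts)

-- ===== LEMMAS AND PROOFS =====

-- the two fuel searches agree
theorem uniquifySearch_eq (s : PySem.Set String) (k : String) :
    ∀ (f : Nat) (i : Int), uniquifySearchA s k f i = uniquifySearchB s k f i := by
  intro f
  induction f with
  | zero => intro i; rfl
  | succ f ih =>
      intro i
      simp only [uniquifySearchA, uniquifySearchB]
      split <;> simp [ih]

-- A's count dict: lookup after the filling loop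
theorem getA_foldl_insert (l : List String) (f : String → Int) (d : PySem.Dict String Int)
    (k : String) :
    (l.foldl (fun d x => d.insert x (f x)) d).get? k
      = if k ∈ l then some (f k) else d.get? k := by
  induction l generalizing d with
  | nil => simp
  | cons a t ih =>
      simp only [List.foldl_cons, ih]
      by_cases ht : k ∈ t
      · simp [ht]
      · by_cases hk : k = a
        · subst hk; simp [ht, PySem.Dict.get?_insert_self]
        · simp [ht, hk, PySem.Dict.get?_insert_of_ne _ _ hk]

-- B's replacement dict: lookup after the building loop
theorem get_repl_foldl (S : List String) (g : String → Int) (w : String → String)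
    (r : PySem.Dict String String) (k : String) :
    (S.foldl (fun r a => if g a > 1 then r.insert a (w a) else r) r).get? k
      = if k ∈ S ∧ g k > 1 then some (w k) else r.get? k := by
  induction S generalizing r with
  | nil => simp
  | cons a t ih =>
      simp only [List.foldl_cons, ih]
      by_cases ht : k ∈ t ∧ g k > 1
      · simp [ht]
      · by_cases hk : k = a
        · subst hk
          by_cases hg : g k > 1
          · simp [hg, PySem.Dict.get?_insert_self]
          · simp [hg]
        · by_cases hg : g a > 1
          · simp [ht, hk, hg, PySem.Dict.get?_insert_of_ne _ _ hk]
          · simp [ht, hk, hg]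

-- ===== VERDICT (by name: the statement is the Claim_ definition above) =====
theorem uniquify_py_spec : Claim_equal_uniquify_py := by
  unfold Claim_equal_uniquify_py Spec_uniquify_py
  intro opts _
  simp only [uniquify_py, uniquify_py_alt]
  have hbody : ∀ (acc : List String) (x : String), x ∈ opts →
      (if ((opts.foldl (fun d k => d.insert k ((PySem.List.count opts k : Nat) : Int))
              PySem.Dict.empty).getD x 0 == 1) then acc ++ [x]
        else acc ++ [uniquifySearchA (PySem.Set.ofList opts) x (opts.length + 1) 0])
      = acc ++ [(fun k => if (((PySem.List.count opts k : Nat) : Int) == 1) then k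
          else uniquifySearchA (PySem.Set.ofList opts) k (opts.length + 1) 0) x] := by
    intro acc x hx
    rw [PySem.Dict.getD_eq_get?_getD,
        getA_foldl_insert opts (fun x => ((PySem.List.count opts x : Nat) : Int)) PySem.Dict.empty x]
    simp only [hx, if_pos, Option.getD_some]
    split <;> rfl
  rw [PySem.List.foldl_congr_mem _ _ _ _ hbody, PySem.List.foldl_append_singleton_eq_map,
      PySem.Dict.foldl_insert_getD_add_one_eq_counter, PySem.Dict.items_counter,
      List.foldl_map, List.nil_append]
  apply List.map_congr_left
  intro k hk
  rw [get_repl_foldl]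
  have hcnt : 0 < List.count k opts := List.count_pos_iff.mpr hk
  have hmem : k ∈ PySem.Set.ofList opts := by
    simp [PySem.Set.mem_ofList, hk]
  by_cases hg : 1 < List.count k opts
  · have hne : List.count k opts ≠ 1 := by omega
    simp [hmem, hg, hne, PySem.List.count_eq, uniquifySearch_eq]
  · have h1 : List.count k opts = 1 := by omega
    simp [h1, PySem.List.count_eq]
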